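-- pv_equiv track=rewrite | github.com/volcengine/verl | atropos/environments/intern_bootcamp/internbootcamp_lib/internbootcamp/bootcamp/f1shortcolorfulstrip/f1shortcolorfulstrip.py | solve
-- ===== SOURCE A (Python) =====
-- MOD = 998244353
--
-- def solve(n, c_list):
--     C = [x - 1 for x in c_list]
--     DP = [[1] * (n + 1) for _ in range(n + 1)]
--     for le in range(1, n + 1):
--         for i in range(n - le + 1):
--             j = i + le
--             k = min(range(i, j), key=lambda x: C[x])
--             ans1 = 0
--             for split in range(i, k + 1):
--                 ans1 = (ans1 + DP[i][split] * DP[split][k]) % MOD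
--             ans2 = 0
--             for split in range(k + 1, j + 1):
--                 ans2 = (ans2 + DP[k + 1][split] * DP[split][j]) % MOD
--             DP[i][j] = (ans1 * ans2) % MOD
--     return DP[0][n] % MOD
-- ===== SOURCE B (Python) =====
-- MOD = 998244353
--
-- def solve(n, c_list):
--     # Top-down memoized recursion over intervals instead of A's bottom-up
--     # length-ordered table fill; same leftmost-argmin split.
--     C = [x - 1 for x in c_list]
--     memo = {}
--
--     def rec(i, j):
--         if i == j:
--             return 1
--         key = (i, j)
--         v = memo.get(key)
--         if v is not None:
--             return v
--         k = min(range(i, j), key=lambda x: C[x])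
--         a1 = sum(rec(i, s) * rec(s, k) for s in range(i, k + 1)) % MOD
--         a2 = sum(rec(k + 1, s) * rec(s, j) for s in range(k + 1, j + 1)) % MOD
--         v = a1 * a2 % MOD
--         memo[key] = v
--         return v
--
--     return rec(0, n) % MOD
-- ===== Notes on version B (the rewrite author's own statement) =====
-- stated objective: alternative
-- what changed: Replaces A's bottom-up length-ordered DP table fill with a top-down memoized recursion over intervals, recursing on the argmin split instead of filling the whole table by increasing length.
import Mathlib
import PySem

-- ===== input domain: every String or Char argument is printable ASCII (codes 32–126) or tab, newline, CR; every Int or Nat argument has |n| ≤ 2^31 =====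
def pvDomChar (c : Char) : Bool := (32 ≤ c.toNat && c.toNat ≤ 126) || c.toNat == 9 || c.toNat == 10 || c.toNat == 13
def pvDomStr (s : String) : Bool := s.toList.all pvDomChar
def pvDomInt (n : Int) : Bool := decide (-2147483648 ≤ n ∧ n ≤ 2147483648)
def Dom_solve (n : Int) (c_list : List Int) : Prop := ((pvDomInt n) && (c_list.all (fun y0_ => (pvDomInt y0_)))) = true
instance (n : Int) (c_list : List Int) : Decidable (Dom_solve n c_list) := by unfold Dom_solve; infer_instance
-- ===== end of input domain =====

-- B replaces A's bottom-up length-ordered DP table fill by a top-down memoized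
-- recursion over intervals (objective: alternative decomposition, same results).

def pvMOD : Int := 998244353

-- k = min(range(i, j), key=lambda x: C[x]) — FIRST (leftmost) argmin; this very
-- expression occurs verbatim in both Pythons, so both ports share this helper.
-- C[x] is read with default 0: under Pre_solve every accessed index is in range,
-- where this is exact (out of range Python raises IndexError, excluded by Pre_).
def pvArgmin (C : List Int) (i j : Int) : Int :=
  (PySem.List.min? (PySem.List.pyRange i j 1) (fun x => PySem.List.pyGetD C x 0)).getD 0

-- ===== PORT A =====
-- DP[a][b] read and DP[a][b] = v write; all indices used are nonnegative and in
-- range under Pre_solve, where pyGetD/pySetD are exact.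
def pvGet (DP : List (List Int)) (a b : Int) : Int :=
  PySem.List.pyGetD (PySem.List.pyGetD DP a []) b 0

def pvSet (DP : List (List Int)) (a b : Int) (v : Int) : List (List Int) :=
  PySem.List.pySetD DP a (PySem.List.pySetD (PySem.List.pyGetD DP a []) b v)

-- body of A's inner 'for i in range(n - le + 1)' loop
def pvInner (C : List Int) (le : Int) (DP : List (List Int)) (i : Int) : List (List Int) :=
  let j := i + le
  let k := pvArgmin C i j
  let ans1 := (PySem.List.pyRange i (k + 1) 1).foldl
    (fun a split => PySem.Int.mod (a + pvGet DP i split * pvGet DP split k) pvMOD) 0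
  let ans2 := (PySem.List.pyRange (k + 1) (j + 1) 1).foldl
    (fun a split => PySem.Int.mod (a + pvGet DP (k + 1) split * pvGet DP split j) pvMOD) 0
  pvSet DP i j (PySem.Int.mod (ans1 * ans2) pvMOD)

def solve (n : Int) (c_list : List Int) : Int :=
  let C := c_list.map (fun x => x - 1)
  let DP0 : List (List Int) :=
    (PySem.List.pyRange 0 (n + 1) 1).map (fun _ => PySem.List.pyRepeat [(1 : Int)] (n + 1))
  let DP := (PySem.List.pyRange 1 (n + 1) 1).foldl
    (fun DP le => (PySem.List.pyRange 0 (n - le + 1) 1).foldl (pvInner C le) DP) DP0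
  PySem.Int.mod (pvGet DP 0 n) pvMOD

-- ===== PORT B =====
-- B's rec(i, j); the Python memo is a pure cache of this recursion's values and
-- changes no result, so the port is the same recursion with fuel (fuel ≥ j - i
-- suffices, see solveRec_fuel below; the fuel-0 value 1 is never reached then).
def solveRec (C : List Int) : Nat → Int → Int → Int
  | 0, _, _ => 1
  | f + 1, i, j =>
    if i = j then 1
    else
      let k := pvArgmin C i j
      let a1 := PySem.Int.mod ((PySem.List.pyRange i (k + 1) 1).map
        (fun s => solveRec C f i s * solveRec C f s k)).sum pvMOD
      let a2 := PySem.Int.mod ((PySem.List.pyRange (k + 1) (j + 1) 1).map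
        (fun s => solveRec C f (k + 1) s * solveRec C f s j)).sum pvMOD
      PySem.Int.mod (a1 * a2) pvMOD

def solve_alt (n : Int) (c_list : List Int) : Int :=
  PySem.Int.mod (solveRec (c_list.map (fun x => x - 1)) n.toNat 0 n) pvMOD

-- ===== PRECONDITION & SPEC =====
-- Pre_solve: exactly where Python A returns normally (n < 0 makes DP[0][n] an
-- IndexError; c_list shorter than n makes C[x] an IndexError in the argmin key).
def Pre_solve (n : Int) (c_list : List Int) : Prop := 0 ≤ n ∧ n ≤ (c_list.length : Int)
instance (n : Int) (c_list : List Int) : Decidable (Pre_solve n c_list) := by unfold Pre_solve; infer_instance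

def pvWitness_solve : Int × List Int := (3, [2, 1, 3])

def Spec_solve (n : Int) (c_list : List Int) (out : Int) : Prop := out = solve_alt n c_list
instance (n : Int) (c_list : List Int) (out : Int) : Decidable (Spec_solve n c_list out) := by unfold Spec_solve; infer_instance

-- ===== CLAIM (what is proved, stated in full; the proofs are below) =====
def Claim_equal_solve : Prop := ∀ (n : Int) (c_list : List Int), Dom_solve n c_list → Pre_solve n c_list → Spec_solve n c_list (solve n c_list)

-- ===== LEMMAS AND PROOFS =====

theorem pvMod_eq (a : Int) : PySem.Int.mod a pvMOD = a % pvMOD :=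
  PySem.Int.mod_eq_emod_of_pos (by norm_num [pvMOD])

-- generic loop-invariant rule for a fold over range(a, b)
theorem pvFoldlInv {S : Type} (f : S → Int → S) (P : Int → S → Prop) :
    ∀ (m : Nat) (a b : Int) (s : S), (b - a).toNat = m → a ≤ b → P a s →
      (∀ x s', a ≤ x → x < b → P x s' → P (x + 1) (f s' x)) →
      P b ((PySem.List.pyRange a b 1).foldl f s) := by
  intro m
  induction m with
  | zero =>
    intro a b s hm hab hP _
    have hba : b = a := by omega
    subst hba
    rw [PySem.List.pyRange_one_eq_nil le_rfl]
    exact hP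
  | succ m ih =>
    intro a b s hm hab hP hstep
    have hlt : a < b := by omega
    rw [PySem.List.pyRange_one_cons hlt, List.foldl_cons]
    exact ih (a + 1) b (f s a) (by omega) (by omega)
      (hstep a s le_rfl hlt hP)
      (fun x s' hx hxb h => hstep x s' (by omega) hxb h)

theorem pvModFoldAux (f : Int → Int) :
    ∀ (l : List Int) (a : Int),
      l.foldl (fun acc s => PySem.Int.mod (acc + f s) pvMOD) (a % pvMOD)
        = (a + (l.map f).sum) % pvMOD := by
  intro l
  induction l with
  | nil => intro a; simp
  | cons x t ih =>
    intro a
    simp only [List.foldl_cons, List.map_cons, List.sum_cons]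
    rw [pvMod_eq, Int.emod_add_emod, ih (a + f x)]
    ring_nf

theorem pvModFold (f : Int → Int) (l : List Int) :
    l.foldl (fun acc s => PySem.Int.mod (acc + f s) pvMOD) 0
      = ((l.map f).sum) % pvMOD := by
  have h := pvModFoldAux f l 0
  simpa using h

theorem pvArgmin_bounds (C : List Int) (i j : Int) (h : i < j) :
    i ≤ pvArgmin C i j ∧ pvArgmin C i j < j := by
  rcases hmin : PySem.List.min? (PySem.List.pyRange i j 1) (fun x => PySem.List.pyGetD C x 0) with _ | m
  · exfalso
    have : PySem.List.pyRange i j 1 = [] := (PySem.List.min?_eq_none_iff _ _).mp hmin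
    have hi : i ∈ PySem.List.pyRange i j 1 := (PySem.List.mem_pyRange_one).mpr ⟨le_rfl, h⟩
    simp [this] at hi
  · have hm : m ∈ PySem.List.pyRange i j 1 := PySem.List.min?_mem hmin
    have := (PySem.List.mem_pyRange_one).mp hm
    simp only [pvArgmin, hmin, Option.getD_some]
    exact this

-- fuel beyond j - i is irrelevant for solveRec
theorem solveRec_fuel (C : List Int) :
    ∀ (f : Nat) (i j : Int), i ≤ j → (j - i).toNat ≤ f →
      solveRec C f i j = solveRec C (j - i).toNat i j := by
  intro f
  induction f using Nat.strong_induction_on with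
  | _ f ih =>
    intro i j hij hle
    match f, hle with
    | 0, hle =>
      have : (j - i).toNat = 0 := by omega
      rw [this]
    | f + 1, hle =>
      by_cases hij' : i = j
      · subst hij'
        simp [solveRec]
      · have hlt : i < j := lt_of_le_of_ne hij hij'
        obtain ⟨m, hm⟩ : ∃ m, (j - i).toNat = m + 1 := ⟨(j - i).toNat - 1, by omega⟩
        obtain ⟨hk1, hk2⟩ := pvArgmin_bounds C i j hlt
        rw [hm]
        show solveRec C (f + 1) i j = solveRec C (m + 1) i j
        simp only [solveRec, if_neg hij']
        have e1 : List.map (fun s => solveRec C f i s * solveRec C f s (pvArgmin C i j))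
              (PySem.List.pyRange i (pvArgmin C i j + 1) 1)
            = List.map (fun s => solveRec C m i s * solveRec C m s (pvArgmin C i j))
              (PySem.List.pyRange i (pvArgmin C i j + 1) 1) := by
          apply List.map_congr_left
          intro t ht
          obtain ⟨ht1, ht2⟩ := (PySem.List.mem_pyRange_one).mp ht
          rw [ih f (by omega) i t (by omega) (by omega),
              ih f (by omega) t (pvArgmin C i j) (by omega) (by omega),
              ih m (by omega) i t (by omega) (by omega),
              ih m (by omega) t (pvArgmin C i j) (by omega) (by omega)]
        have e2 : List.map (fun s => solveRec C f (pvArgmin C i j + 1) s * solveRec C f s j)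
              (PySem.List.pyRange (pvArgmin C i j + 1) (j + 1) 1)
            = List.map (fun s => solveRec C m (pvArgmin C i j + 1) s * solveRec C m s j)
              (PySem.List.pyRange (pvArgmin C i j + 1) (j + 1) 1) := by
          apply List.map_congr_left
          intro t ht
          obtain ⟨ht1, ht2⟩ := (PySem.List.mem_pyRange_one).mp ht
          rw [ih f (by omega) (pvArgmin C i j + 1) t (by omega) (by omega),
              ih f (by omega) t j (by omega) (by omega),
              ih m (by omega) (pvArgmin C i j + 1) t (by omega) (by omega),
              ih m (by omega) t j (by omega) (by omega)]
        rw [e1, e2]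

-- canonical interval value of B's recursion
def pvR (C : List Int) (i j : Int) : Int := solveRec C (j - i).toNat i j

theorem pvR_diag (C : List Int) (i : Int) : pvR C i i = 1 := by
  simp [pvR, solveRec]

theorem pvR_rec (C : List Int) (i j : Int) (hlt : i < j) :
    pvR C i j =
      PySem.Int.mod
        (PySem.Int.mod ((PySem.List.pyRange i (pvArgmin C i j + 1) 1).map
            (fun s => pvR C i s * pvR C s (pvArgmin C i j))).sum pvMOD *
         PySem.Int.mod ((PySem.List.pyRange (pvArgmin C i j + 1) (j + 1) 1).map
            (fun s => pvR C (pvArgmin C i j + 1) s * pvR C s j)).sum pvMOD) pvMOD := by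
  obtain ⟨m, hm⟩ : ∃ m, (j - i).toNat = m + 1 := ⟨(j - i).toNat - 1, by omega⟩
  obtain ⟨hk1, hk2⟩ := pvArgmin_bounds C i j hlt
  rw [pvR, hm]
  simp only [solveRec, if_neg (by omega : ¬ i = j)]
  have e1 : List.map (fun s => solveRec C m i s * solveRec C m s (pvArgmin C i j))
        (PySem.List.pyRange i (pvArgmin C i j + 1) 1)
      = List.map (fun s => pvR C i s * pvR C s (pvArgmin C i j))
        (PySem.List.pyRange i (pvArgmin C i j + 1) 1) := by
    apply List.map_congr_left
    intro t ht
    obtain ⟨ht1, ht2⟩ := (PySem.List.mem_pyRange_one).mp ht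
    rw [solveRec_fuel C m i t (by omega) (by omega),
        solveRec_fuel C m t (pvArgmin C i j) (by omega) (by omega)]
    rfl
  have e2 : List.map (fun s => solveRec C m (pvArgmin C i j + 1) s * solveRec C m s j)
        (PySem.List.pyRange (pvArgmin C i j + 1) (j + 1) 1)
      = List.map (fun s => pvR C (pvArgmin C i j + 1) s * pvR C s j)
        (PySem.List.pyRange (pvArgmin C i j + 1) (j + 1) 1) := by
    apply List.map_congr_left
    intro t ht
    obtain ⟨ht1, ht2⟩ := (PySem.List.mem_pyRange_one).mp ht
    rw [solveRec_fuel C m (pvArgmin C i j + 1) t (by omega) (by omega),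
        solveRec_fuel C m t j (by omega) (by omega)]
    rfl
  rw [e1, e2]

-- table shape
def pvDims (n : Int) (DP : List (List Int)) : Prop :=
  DP.length = (n + 1).toNat ∧ ∀ row ∈ DP, row.length = (n + 1).toNat

theorem pvGet_getD (DP : List (List Int)) (a b : Int) (ha : 0 ≤ a) (hb : 0 ≤ b) :
    pvGet DP a b = (DP.getD a.toNat []).getD b.toNat 0 := by
  unfold pvGet
  rw [PySem.List.pyGetD_of_nonneg _ _ ha, PySem.List.pyGetD_of_nonneg _ _ hb]

theorem pvSet_eq (n : Int) (DP : List (List Int)) (h : pvDims n DP) (hn : 0 ≤ n)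
    (i j : Int) (hi : 0 ≤ i) (hin : i ≤ n) (hj : 0 ≤ j) (_hjn : j ≤ n) (v : Int) :
    ∃ (h1 : i.toNat < DP.length),
      pvSet DP i j v = DP.set i.toNat ((DP[i.toNat]).set j.toNat v) := by
  obtain ⟨hlen, hrow⟩ := h
  have h1 : i.toNat < DP.length := by omega
  refine ⟨h1, ?_⟩
  unfold pvSet
  rw [PySem.List.pySetD_of_nonneg _ _ hj, PySem.List.pySetD_of_nonneg _ _ hi,
      PySem.List.pyGetD_eq_getElem _ _ hi (by omega)]

theorem pvDims_pvSet (n : Int) (DP : List (List Int)) (h : pvDims n DP) (hn : 0 ≤ n)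
    (i j : Int) (hi : 0 ≤ i) (hin : i ≤ n) (hj : 0 ≤ j) (hjn : j ≤ n) (v : Int) :
    pvDims n (pvSet DP i j v) := by
  obtain ⟨h1, heq⟩ := pvSet_eq n DP h hn i j hi hin hj hjn v
  obtain ⟨hlen, hrow⟩ := h
  rw [heq]
  constructor
  · simp [hlen]
  · intro row hmem
    rcases List.mem_or_eq_of_mem_set hmem with hmem' | hset
    · exact hrow _ hmem'
    · rw [hset, List.length_set]; exact hrow _ (DP.getElem_mem h1)

theorem pvGet_pvSet (n : Int) (DP : List (List Int)) (h : pvDims n DP) (hn : 0 ≤ n)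
    (i j a b : Int) (hi : 0 ≤ i) (hin : i ≤ n) (hj : 0 ≤ j) (hjn : j ≤ n)
    (ha : 0 ≤ a) (_han : a ≤ n) (hb : 0 ≤ b) (hbn : b ≤ n) (v : Int) :
    pvGet (pvSet DP i j v) a b = if a = i ∧ b = j then v else pvGet DP a b := by
  obtain ⟨hlen, hrow⟩ := h
  have h1 : i.toNat < DP.length := by omega
  have hrl : (DP[i.toNat]).length = (n + 1).toNat := hrow _ (DP.getElem_mem h1)
  obtain ⟨_, heq⟩ := pvSet_eq n DP ⟨hlen, hrow⟩ hn i j hi hin hj hjn v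
  rw [heq, pvGet_getD _ _ _ ha hb, pvGet_getD _ _ _ ha hb]
  simp only [List.getD_eq_getElem?_getD]
  rw [List.getElem?_set]
  by_cases hai : a = i
  · subst hai
    rw [if_pos rfl, if_pos h1]
    simp only [Option.getD_some]
    rw [List.getElem?_set]
    by_cases hbj : b = j
    · subst hbj
      rw [if_pos rfl, if_pos (by omega), Option.getD_some, if_pos (by simp)]
    · rw [if_neg (by omega), if_neg (fun hc => hbj hc.2),
          List.getElem?_eq_getElem h1, Option.getD_some]
  · rw [if_neg (by omega), if_neg (fun hc => hai hc.1)]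

-- invariant after all lengths < le are filled
def pvInvO (C : List Int) (n le : Int) (DP : List (List Int)) : Prop :=
  pvDims n DP ∧ ∀ a b : Int, 0 ≤ a → a ≤ b → b ≤ n →
    pvGet DP a b = if b - a < le then pvR C a b else 1

-- invariant inside the inner loop of length le, columns < x done
def pvInvI (C : List Int) (n le x : Int) (DP : List (List Int)) : Prop :=
  pvDims n DP ∧ ∀ a b : Int, 0 ≤ a → a ≤ b → b ≤ n →
    pvGet DP a b = if b - a < le ∨ (b - a = le ∧ a < x) then pvR C a b else 1

theorem pvInner_step (C : List Int) (n le i : Int) (DP : List (List Int))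
    (hn : 0 ≤ n) (hle1 : 1 ≤ le) (_hlen : le ≤ n)
    (hi : 0 ≤ i) (hib : i < n - le + 1)
    (h : pvInvI C n le i DP) :
    pvInvI C n le (i + 1) (pvInner C le DP i) := by
  obtain ⟨hdims, hinv⟩ := h
  obtain ⟨hk1, hk2⟩ := pvArgmin_bounds C i (i + le) (by omega)
  have hans1 : (PySem.List.pyRange i (pvArgmin C i (i + le) + 1) 1).foldl
      (fun a split => PySem.Int.mod (a + pvGet DP i split * pvGet DP split (pvArgmin C i (i + le))) pvMOD) 0
      = PySem.Int.mod ((PySem.List.pyRange i (pvArgmin C i (i + le) + 1) 1).map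
          (fun s => pvR C i s * pvR C s (pvArgmin C i (i + le)))).sum pvMOD := by
    have hcongr := PySem.List.foldl_congr_mem (PySem.List.pyRange i (pvArgmin C i (i + le) + 1) 1)
      (fun a split => PySem.Int.mod (a + pvGet DP i split * pvGet DP split (pvArgmin C i (i + le))) pvMOD)
      (fun a split => PySem.Int.mod (a + pvR C i split * pvR C split (pvArgmin C i (i + le))) pvMOD) 0
      (by
        intro acc s hs
        obtain ⟨hs1, hs2⟩ := (PySem.List.mem_pyRange_one).mp hs
        dsimp only
        rw [hinv i s hi hs1 (by omega),
            hinv s (pvArgmin C i (i + le)) (by omega) (by omega) (by omega)]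
        rw [if_pos (by omega), if_pos (by omega)])
    rw [hcongr, pvModFold, pvMod_eq]
  have hans2 : (PySem.List.pyRange (pvArgmin C i (i + le) + 1) (i + le + 1) 1).foldl
      (fun a split => PySem.Int.mod (a + pvGet DP (pvArgmin C i (i + le) + 1) split * pvGet DP split (i + le)) pvMOD) 0
      = PySem.Int.mod ((PySem.List.pyRange (pvArgmin C i (i + le) + 1) (i + le + 1) 1).map
          (fun s => pvR C (pvArgmin C i (i + le) + 1) s * pvR C s (i + le))).sum pvMOD := by
    have hcongr := PySem.List.foldl_congr_mem (PySem.List.pyRange (pvArgmin C i (i + le) + 1) (i + le + 1) 1)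
      (fun a split => PySem.Int.mod (a + pvGet DP (pvArgmin C i (i + le) + 1) split * pvGet DP split (i + le)) pvMOD)
      (fun a split => PySem.Int.mod (a + pvR C (pvArgmin C i (i + le) + 1) split * pvR C split (i + le)) pvMOD) 0
      (by
        intro acc s hs
        obtain ⟨hs1, hs2⟩ := (PySem.List.mem_pyRange_one).mp hs
        dsimp only
        rw [hinv (pvArgmin C i (i + le) + 1) s (by omega) (by omega) (by omega),
            hinv s (i + le) (by omega) (by omega) (by omega)]
        rw [if_pos (by omega), if_pos (by omega)])
    rw [hcongr, pvModFold, pvMod_eq]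
  have hval : pvInner C le DP i = pvSet DP i (i + le) (pvR C i (i + le)) := by
    simp only [pvInner]
    rw [hans1, hans2, ← pvR_rec C i (i + le) (by omega)]
  rw [hval]
  refine ⟨pvDims_pvSet n DP hdims hn i (i + le) hi (by omega) (by omega) (by omega) _, ?_⟩
  intro a b ha hab hbn
  rw [pvGet_pvSet n DP hdims hn i (i + le) a b hi (by omega) (by omega) (by omega) ha (by omega) (by omega) hbn]
  by_cases hcase : a = i ∧ b = i + le
  · obtain ⟨ha', hb'⟩ := hcase
    subst ha'; subst hb'
    rw [if_pos ⟨rfl, rfl⟩, if_pos (by omega)]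
  · rw [if_neg hcase]
    rw [hinv a b ha hab hbn]
    by_cases hc1 : b - a < le ∨ (b - a = le ∧ a < i)
    · rw [if_pos hc1, if_pos (by omega)]
    · rw [if_neg hc1, if_neg (by omega)]

theorem pvOuter_step (C : List Int) (n le : Int) (DP : List (List Int))
    (hn : 0 ≤ n) (hle1 : 1 ≤ le) (hlen : le ≤ n)
    (h : pvInvO C n le DP) :
    pvInvO C n (le + 1) ((PySem.List.pyRange 0 (n - le + 1) 1).foldl (pvInner C le) DP) := by
  have hbase : pvInvI C n le 0 DP := by
    obtain ⟨hdims, hinv⟩ := h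
    refine ⟨hdims, ?_⟩
    intro a b ha hab hbn
    rw [hinv a b ha hab hbn]
    by_cases hc : b - a < le
    · rw [if_pos hc, if_pos (by omega)]
    · rw [if_neg hc, if_neg (by omega)]
  have hres := pvFoldlInv (pvInner C le) (pvInvI C n le) (n - le + 1 - 0).toNat 0 (n - le + 1) DP
    (by omega) (by omega) hbase
    (fun x DP' hx hxb hP => pvInner_step C n le x DP' hn hle1 hlen hx hxb hP)
  obtain ⟨hdims, hinv⟩ := hres
  refine ⟨hdims, ?_⟩
  intro a b ha hab hbn
  rw [hinv a b ha hab hbn]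
  by_cases hc : b - a < le + 1
  · rw [if_pos (by omega), if_pos hc]
  · rw [if_neg (by omega), if_neg hc]

theorem pvInit (C : List Int) (n : Int) (hn : 0 ≤ n) :
    pvInvO C n 1 ((PySem.List.pyRange 0 (n + 1) 1).map
      (fun _ => PySem.List.pyRepeat [(1 : Int)] (n + 1))) := by
  have hdims : pvDims n ((PySem.List.pyRange 0 (n + 1) 1).map
      (fun _ => PySem.List.pyRepeat [(1 : Int)] (n + 1))) := by
    constructor
    · rw [List.length_map, PySem.List.length_pyRange_one]
      omega
    · intro row hmem
      obtain ⟨x, _, hx⟩ := List.mem_map.mp hmem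
      rw [← hx, PySem.List.pyRepeat_singleton, List.length_replicate]
  refine ⟨hdims, ?_⟩
  intro a b ha hab hbn
  rw [pvGet_getD _ _ _ ha (by omega)]
  have h1 : a.toNat < ((PySem.List.pyRange 0 (n + 1) 1).map
      (fun _ => PySem.List.pyRepeat [(1 : Int)] (n + 1))).length := by
    rw [List.length_map, PySem.List.length_pyRange_one]; omega
  have hrowa : (List.map (fun _ => PySem.List.pyRepeat [(1 : Int)] (n + 1))
      (PySem.List.pyRange 0 (n + 1) 1)).getD a.toNat [] = PySem.List.pyRepeat [(1 : Int)] (n + 1) := by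
    rw [List.getD_eq_getElem?_getD, List.getElem?_eq_getElem h1, Option.getD_some, List.getElem_map]
  have hone : (PySem.List.pyRepeat [(1 : Int)] (n + 1)).getD b.toNat 0 = 1 := by
    rw [PySem.List.pyRepeat_singleton, List.getD_eq_getElem?_getD, List.getElem?_replicate,
        if_pos (by omega), Option.getD_some]
  rw [hrowa, hone]
  by_cases hc : b - a < 1
  · have hba : b = a := by omega
    subst hba
    rw [if_pos (by omega), pvR_diag]
  · rw [if_neg hc]

-- ===== VERDICT (by name: the statement is the Claim_ definition above) =====
theorem solve_spec : Claim_equal_solve := by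
  intro n c_list _hdom hpre
  obtain ⟨hn, _hlen⟩ := hpre
  unfold Spec_solve
  show solve n c_list = solve_alt n c_list
  simp only [solve, solve_alt]
  set C := c_list.map (fun x => x - 1) with hC
  have hfinal : pvInvO C n (n + 1)
      ((PySem.List.pyRange 1 (n + 1) 1).foldl
        (fun DP le => (PySem.List.pyRange 0 (n - le + 1) 1).foldl (pvInner C le) DP)
        ((PySem.List.pyRange 0 (n + 1) 1).map
          (fun _ => PySem.List.pyRepeat [(1 : Int)] (n + 1)))) := by
    exact pvFoldlInv _ (pvInvO C n) (n + 1 - 1).toNat 1 (n + 1) _ (by omega) (by omega)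
      (pvInit C n hn)
      (fun le DP hle1 hleb hP => pvOuter_step C n le DP hn hle1 (by omega) hP)
  obtain ⟨hdims, hinv⟩ := hfinal
  rw [hinv 0 n le_rfl hn le_rfl, if_pos (by omega)]
  have hpv : pvR C 0 n = solveRec C n.toNat 0 n := by
    unfold pvR
    rw [Int.sub_zero]
  rw [hpv]
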